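-- pv_equiv track=rewrite | github.com/zhiro-labs/daia | utils/discord_helpers.py | _find_line_boundaries
-- ===== SOURCE A (Python) =====
-- from typing import List, Optional, Tuple, NamedTuple
--
-- def _find_line_boundaries(text: str) -> List[Tuple[int, int]]:
--     """Find line boundaries in the text."""
--     lines = []
--     start = 0
--
--     while start < len(text):
--         end = text.find("\n", start)
--         if end == -1:
--             end = len(text)
--         else:
--             end += 1
--
--         lines.append((start, end))
--         start = end
--
--     return lines
-- ===== SOURCE B (Python) =====
-- def _find_line_boundaries(text):
--     """Find line boundaries in the text."""
--     parts = text.split("\n")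
--     bounds = [0]
--     acc = 0
--     for part in parts[:-1]:
--         acc += len(part) + 1
--         bounds.append(acc)
--     bounds.append(acc + len(parts[-1]))
--     lines = list(zip(bounds, bounds[1:]))
--     if not parts[-1]:
--         lines.pop()
--     return lines
-- ===== Notes on version B (the rewrite author's own statement) =====
-- stated objective: alternative
-- what changed: B splits the text on newline once, builds a prefix-sum table of boundary offsets from the part lengths, zips adjacent boundaries into pairs and pops the last pair when the final part is empty, replacing A's incremental find-loop over character indices.
import Mathlib
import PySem

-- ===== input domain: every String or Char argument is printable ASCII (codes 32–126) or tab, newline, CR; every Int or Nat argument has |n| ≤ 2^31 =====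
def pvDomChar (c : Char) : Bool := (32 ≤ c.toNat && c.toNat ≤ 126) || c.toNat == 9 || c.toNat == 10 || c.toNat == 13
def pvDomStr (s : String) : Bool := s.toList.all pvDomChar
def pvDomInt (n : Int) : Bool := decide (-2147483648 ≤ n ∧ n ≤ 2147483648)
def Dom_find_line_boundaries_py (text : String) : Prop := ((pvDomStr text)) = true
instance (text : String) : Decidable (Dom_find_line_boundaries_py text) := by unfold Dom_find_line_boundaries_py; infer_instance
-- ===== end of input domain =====

-- B replaces A's incremental find-loop by splitting on newline once, building a prefix-sum
-- table of boundary offsets from the part lengths and zipping adjacent boundaries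
-- (alternative decomposition, same O(n) cost).


-- ===== PORT A =====
-- end = text.find("\n", start); if end == -1: end = len(text) else: end += 1
def pvEndA (cs : List Char) (start : Nat) : Int :=
  if PySem.Chars.findFrom cs ['\n'] (start : Int) = -1 then PySem.Chars.len cs
  else PySem.Chars.findFrom cs ['\n'] (start : Int) + 1

-- termination fact for the while loop: the new start strictly grows and stays ≤ len
theorem pvEndA_bounds (cs : List Char) (start : Nat) (h : start < cs.length) :
    (start : Int) < pvEndA cs start ∧ pvEndA cs start ≤ (cs.length : Int) := by
  unfold pvEndA
  split
  · simp [PySem.Chars.len_eq]; omega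
  · rename_i hne
    have hk : start ≤ cs.length := Nat.le_of_lt h
    have := PySem.Chars.findFrom_natCast_spec cs ['\n'] start hk hne
    obtain ⟨hge, hpre, -⟩ := this
    have hlt : (PySem.Chars.findFrom cs ['\n'] (start : Int)).toNat < cs.length := by
      by_contra hge2
      have hge3 : cs.length ≤ (PySem.Chars.findFrom cs ['\n'] (start : Int)).toNat :=
        Nat.le_of_not_lt hge2
      rw [List.drop_eq_nil_of_le hge3] at hpre
      simp at hpre
    constructor
    · omega
    · omega

-- the Python while loop: while start < len(text): …
def pvLoopA (cs : List Char) (start : Nat) : List (Int × Int) :=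
  if h : (start : Int) < PySem.Chars.len cs then
    ((start : Int), pvEndA cs start) :: pvLoopA cs (pvEndA cs start).toNat
  else []
termination_by cs.length - start
decreasing_by
  have h' : start < cs.length := by simpa [PySem.Chars.len_eq] using h
  have := pvEndA_bounds cs start h'
  omega

def find_line_boundaries_py (text : String) : List (Int × Int) :=
  pvLoopA text.toList 0

-- ===== PORT B =====
-- parts = text.split("\n"); prefix-sum bounds; lines = zip(bounds, bounds[1:]); pop if last part empty
def find_line_boundaries_py_alt (text : String) : List (Int × Int) :=
  let parts := text.toList.splitOn '\n'
  let st := parts.dropLast.foldl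
    (fun (st : List Int × Int) part =>
      (st.1 ++ [st.2 + (part.length : Int) + 1], st.2 + (part.length : Int) + 1)) ([(0 : Int)], 0)
  let last := parts.getLast?.getD []
  let bounds := st.1 ++ [st.2 + (last.length : Int)]
  let lines := bounds.zip (bounds.drop 1)
  if last = [] then lines.dropLast else lines

-- ===== PRECONDITION & SPEC =====
def Spec_find_line_boundaries_py (text : String) (out : List (Int × Int)) : Prop := out = find_line_boundaries_py_alt text
instance (text : String) (out : List (Int × Int)) : Decidable (Spec_find_line_boundaries_py text out) := by unfold Spec_find_line_boundaries_py; infer_instance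

-- ===== CLAIM (what is proved, stated in full; the proofs are below) =====
def Claim_equal_find_line_boundaries_py : Prop := ∀ (text : String), Dom_find_line_boundaries_py text → Spec_find_line_boundaries_py text (find_line_boundaries_py text)

-- ===== LEMMAS AND PROOFS =====

-- the boundary offsets B's fold appends, and the final accumulator
def pvCum (ps : List (List Char)) (acc : Int) : List Int :=
  match ps with
  | [] => []
  | p :: r => (acc + (p.length : Int) + 1) :: pvCum r (acc + (p.length : Int) + 1)

def pvAccEnd (ps : List (List Char)) (acc : Int) : Int :=
  match ps with
  | [] => acc
  | p :: r => pvAccEnd r (acc + (p.length : Int) + 1)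

theorem pvFoldB (ps : List (List Char)) (b : List Int) (acc : Int) :
    ps.foldl (fun (st : List Int × Int) part =>
      (st.1 ++ [st.2 + (part.length : Int) + 1], st.2 + (part.length : Int) + 1)) (b, acc)
    = (b ++ pvCum ps acc, pvAccEnd ps acc) := by
  induction ps generalizing b acc with
  | nil => simp [pvCum, pvAccEnd]
  | cons p r ih => simp [pvCum, pvAccEnd, ih]

-- what the pairs must be, expressed over the list of split parts
def pvOut : List (List Char) → Int → List (Int × Int)
  | [], _ => []
  | [last], s => if last = [] then [] else [(s, s + (last.length : Int))]
  | p :: q :: rest, s =>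
      (s, s + (p.length : Int) + 1) :: pvOut (q :: rest) (s + (p.length : Int) + 1)

-- zip-adjacent of the boundary table (with the conditional pop) = pvOut
theorem pvZipOut (ps : List (List Char)) (last : List Char) (acc : Int) :
    (let bounds := acc :: (pvCum ps acc ++ [pvAccEnd ps acc + (last.length : Int)]);
     let lines := bounds.zip (bounds.drop 1);
     if last = [] then lines.dropLast else lines) = pvOut (ps ++ [last]) acc := by
  induction ps generalizing acc with
  | nil =>
    simp only [pvCum, pvAccEnd, List.nil_append, pvOut]
    by_cases h : last = [] <;> simp [h]
  | cons p r ih =>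
    simp only [pvCum, pvAccEnd, List.cons_append]
    have hne : (pvCum r (acc + (p.length : Int) + 1) ++
        [pvAccEnd r (acc + (p.length : Int) + 1) + (last.length : Int)]) ≠ [] := by simp
    obtain ⟨y, t, hyt⟩ := List.exists_cons_of_ne_nil hne
    have hout : pvOut (p :: (r ++ [last])) acc =
        (acc, acc + (p.length : Int) + 1) :: pvOut (r ++ [last]) (acc + (p.length : Int) + 1) := by
      cases r <;> simp [pvOut]
    rw [hout, ← ih (acc + (p.length : Int) + 1)]
    simp only [hyt]
    by_cases h : last = []
    · simp only [h, if_true]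
      simp [List.zip_cons_cons, List.dropLast_cons_of_ne_nil]
    · simp [h, List.zip_cons_cons]

-- splitting characterized: no newline → one part
theorem pvSplit_no (l : List Char) (h : '\n' ∉ l) : l.splitOn '\n' = [l] := by
  induction l with
  | nil => simp [List.splitOn, List.splitOnP_nil]
  | cons c t ih =>
    simp only [List.mem_cons, not_or] at h
    have hc : (c == '\n') = false := by
      simp only [beq_eq_false_iff_ne]; exact fun he => h.1 he.symm
    have := ih h.2
    simp only [List.splitOn] at this ⊢
    rw [List.splitOnP_cons, hc]
    simp [this]

-- splitting characterized: first newline at idxOf splits off the first part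
theorem pvSplit_mem (l : List Char) (h : '\n' ∈ l) :
    l.splitOn '\n' =
      l.take (l.idxOf '\n') :: (l.drop (l.idxOf '\n' + 1)).splitOn '\n' := by
  induction l with
  | nil => simp at h
  | cons c t ih =>
    by_cases hc : c = '\n'
    · subst hc
      simp only [List.splitOn]
      rw [List.splitOnP_cons]
      simp [List.idxOf_cons_self]
    · have hmem : '\n' ∈ t := by
        rcases List.mem_cons.mp h with h1 | h1
        · exact absurd h1.symm hc
        · exact h1
      have hcb : (c == '\n') = false := by
        simp only [beq_eq_false_iff_ne]; exact hc
      have hidx : (c :: t).idxOf '\n' = t.idxOf '\n' + 1 := by simp [hc]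
      simp only [List.splitOn] at ih ⊢
      rw [List.splitOnP_cons, hcb]
      simp only [Bool.false_eq_true, if_false, ih hmem, hidx]
      simp [List.modifyHead]

-- find.go on a single-character needle is first-index search
theorem pvFindGo_single (l : List Char) (k : Nat) :
    PySem.Chars.find.go ['\n'] l k =
      if '\n' ∈ l then ((k + l.idxOf '\n' : Nat) : Int) else -1 := by
  induction l generalizing k with
  | nil => simp [PySem.Chars.find.go]
  | cons c t ih =>
    rw [PySem.Chars.find.go]
    by_cases hc : c = '\n'
    · subst hc
      simp [List.isPrefixOf, List.idxOf_cons_self]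
    · have hnc : ('\n' : Char) ≠ c := fun he => hc he.symm
      have hpre : (['\n'].isPrefixOf (c :: t)) = false := by
        simp [List.isPrefixOf, hnc]
      rw [hpre]
      simp only [Bool.false_eq_true, if_false]
      rw [ih (k + 1)]
      have hidx : (c :: t).idxOf '\n' = t.idxOf '\n' + 1 := by simp [hc]
      by_cases hm : '\n' ∈ t
      · simp [hm, hnc, hidx]; omega
      · simp [hm, hnc]

theorem pvFind_single (l : List Char) :
    PySem.Chars.find l ['\n'] = if '\n' ∈ l then (l.idxOf '\n' : Int) else -1 := by
  rw [PySem.Chars.find, pvFindGo_single]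
  simp

-- main invariant: A's loop from index `start` equals pvOut over the split of the suffix
theorem pvMain (cs : List Char) (n : Nat) :
    ∀ (start : Nat), start ≤ cs.length → cs.length - start ≤ n →
      pvLoopA cs start = pvOut ((cs.drop start).splitOn '\n') (start : Int) := by
  induction n with
  | zero =>
    intro start hle hb
    have hs : start = cs.length := by omega
    rw [pvLoopA, dif_neg (by simp [PySem.Chars.len_eq]; omega)]
    subst hs
    simp [List.drop_length, List.splitOn, List.splitOnP_nil, pvOut]
  | succ n ih =>
    intro start hle hb
    by_cases hlt : start < cs.length
    · rw [pvLoopA, dif_pos (by simp [PySem.Chars.len_eq]; omega)]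
      have hk : start ≤ cs.length := Nat.le_of_lt hlt
      have hff := PySem.Chars.findFrom_natCast cs ['\n'] start hk
      rw [pvFind_single (cs.drop start)] at hff
      by_cases hm : '\n' ∈ cs.drop start
      · -- a newline at relative index j of the suffix
        set j := (cs.drop start).idxOf '\n' with hj
        have hjlt : j < (cs.drop start).length := List.idxOf_lt_length_of_mem hm
        rw [if_pos hm] at hff
        have hffv : PySem.Chars.findFrom cs ['\n'] (start : Int) = (start : Int) + j := by
          rw [hff]; split
          · omega
          · rfl
        have hend : pvEndA cs start = (start : Int) + j + 1 := by
          unfold pvEndA; rw [hffv, if_neg (by omega)]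
        rw [hend]
        have hton : (((start : Int) + j + 1)).toNat = start + j + 1 := by omega
        rw [hton]
        have hlen : (cs.drop start).length = cs.length - start := List.length_drop ..
        rw [ih (start + j + 1) (by omega) (by omega)]
        rw [pvSplit_mem (cs.drop start) hm, ← hj]
        have hdd : cs.drop (start + j + 1) = (cs.drop start).drop (j + 1) := by
          rw [List.drop_drop]; ring_nf
        rw [hdd]
        obtain ⟨q, rs, hqs⟩ :=
          List.exists_cons_of_ne_nil (by
            simp only [List.splitOn]
            exact List.splitOnP_ne_nil _ _ :
            ((cs.drop start).drop (j + 1)).splitOn '\n' ≠ [])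
        rw [hqs]
        simp only [pvOut]
        have htl : ((cs.drop start).take j).length = j := by
          rw [List.length_take]; omega
        rw [htl, ← hqs]
        push_cast
        ring_nf
      · -- no newline left: one final full segment, then the loop stops
        rw [if_neg hm] at hff
        norm_num at hff
        have hend : pvEndA cs start = (cs.length : Int) := by
          unfold pvEndA; rw [hff]; simp [PySem.Chars.len_eq]
        rw [hend]
        have htn : ((cs.length : Int)).toNat = cs.length := by omega
        rw [htn, ih cs.length (le_refl _) (by omega)]
        rw [pvSplit_no _ hm]
        simp only [List.drop_length, List.splitOn, List.splitOnP_nil, pvOut]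
        have hdlen : (cs.drop start).length = cs.length - start := List.length_drop ..
        have hdne : cs.drop start ≠ [] := by
          intro he; rw [he] at hdlen; simp at hdlen; omega
        rw [if_neg hdne]
        have : (start : Int) + ((cs.drop start).length : Int) = (cs.length : Int) := by
          rw [hdlen]; omega
        rw [this]
        simp
    · have hs : start = cs.length := by omega
      rw [pvLoopA, dif_neg (by simp [PySem.Chars.len_eq]; omega)]
      subst hs
      simp [List.drop_length, List.splitOn, List.splitOnP_nil, pvOut]

-- ===== VERDICT (by name: the statement is the Claim_ definition above) =====
theorem find_line_boundaries_py_spec : Claim_equal_find_line_boundaries_py := by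
  intro text _hdom
  unfold Spec_find_line_boundaries_py find_line_boundaries_py find_line_boundaries_py_alt
  rw [pvMain text.toList text.toList.length 0 (Nat.zero_le _) (by omega)]
  set parts := text.toList.splitOn '\n' with hparts
  have hne : parts ≠ [] := by
    simp only [hparts, List.splitOn]
    exact List.splitOnP_ne_nil _ _
  have hsplit : parts.dropLast ++ [parts.getLast hne] = parts :=
    List.dropLast_append_getLast hne
  have hlastd : parts.getLast?.getD [] = parts.getLast hne := by
    rw [List.getLast?_eq_some_getLast hne]; rfl
  have h := pvZipOut parts.dropLast (parts.getLast hne) 0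
  rw [hsplit] at h
  simp only [List.drop_zero, Nat.cast_zero, ← hparts, hlastd, pvFoldB]
  rw [← h]
  simp
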